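-- pv_equiv track=rewrite | github.com/Ashwin-Baduni/adaptive-transformer-trainer-automated | runner.py | inject_truncation_logic
-- ===== SOURCE A (Python) =====
-- def inject_truncation_logic(content: str) -> str:
--     """Inject truncation logic into the dataset code."""
--     # Find the line where tokens are encoded
--     lines = content.split('\n')
--     modified_lines = []
--
--     for i, line in enumerate(lines):
--         modified_lines.append(line)
--
--         # After encoding tokens, add truncation logic
--         if 'enc_input_tokens = self.tokenizer_src.encode(src_text).ids' in line:
--             modified_lines.append('        dec_input_tokens = self.tokenizer_tgt.encode(tgt_text).ids')
--             modified_lines.append('')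
--             modified_lines.append('        # TRUNCATE LONG SEQUENCES TO FIT seq_len')
--             modified_lines.append('        max_src_len = self.seq_len - 2  # Account for SOS/EOS tokens')
--             modified_lines.append('        max_tgt_len = self.seq_len - 1  # Account for SOS token')
--             modified_lines.append('        ')
--             modified_lines.append('        if len(enc_input_tokens) > max_src_len:')
--             modified_lines.append('            enc_input_tokens = enc_input_tokens[:max_src_len]')
--             modified_lines.append('            ')
--             modified_lines.append('        if len(dec_input_tokens) > max_tgt_len:')
--             modified_lines.append('            dec_input_tokens = dec_input_tokens[:max_tgt_len]')
--             modified_lines.append('')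
--             # Skip the next line since we already added dec_input_tokens
--             continue
--         elif 'dec_input_tokens = self.tokenizer_tgt.encode(tgt_text).ids' in line:
--             # Skip this line since we already added it above
--             continue
--
--     return '\n'.join(modified_lines)
-- ===== SOURCE B (Python) =====
-- _MARKER = 'enc_input_tokens = self.tokenizer_src.encode(src_text).ids'
--
-- _BLOCK = '\n'.join([
--     '        dec_input_tokens = self.tokenizer_tgt.encode(tgt_text).ids',
--     '',
--     '        # TRUNCATE LONG SEQUENCES TO FIT seq_len',
--     '        max_src_len = self.seq_len - 2  # Account for SOS/EOS tokens',
--     '        max_tgt_len = self.seq_len - 1  # Account for SOS token',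
--     '        ',
--     '        if len(enc_input_tokens) > max_src_len:',
--     '            enc_input_tokens = enc_input_tokens[:max_src_len]',
--     '            ',
--     '        if len(dec_input_tokens) > max_tgt_len:',
--     '            dec_input_tokens = dec_input_tokens[:max_tgt_len]',
--     '',
-- ])
--
--
-- def inject_truncation_logic(content: str) -> str:
--     """Inject truncation logic into the dataset code."""
--     # Substring search on the whole string instead of enumerating lines:
--     # jump straight to the next marker occurrence, find the end of its line,
--     # emit everything up to there plus the block, and continue on the
--     # remainder (which still starts with its '\n').
--     out = []
--     rest = content
--     while True:
--         i = rest.find(_MARKER)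
--         if i == -1:
--             out.append(rest)
--             break
--         j = rest.find('\n', i + len(_MARKER))
--         if j == -1:
--             out.append(rest + '\n' + _BLOCK)
--             break
--         out.append(rest[:j] + '\n' + _BLOCK)
--         rest = rest[j:]
--     return ''.join(out)
-- ===== Notes on version B (the rewrite author's own statement) =====
-- stated objective: alternative
-- what changed: Replaces A's line-split loop (which appends every line and a 12-append block after marker lines) by substring search on the raw string: repeatedly find the next marker occurrence, find the end of its line, emit text up to there plus one precomputed block constant, and continue on the remaining suffix — no line list is ever built.
import Mathlib
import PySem

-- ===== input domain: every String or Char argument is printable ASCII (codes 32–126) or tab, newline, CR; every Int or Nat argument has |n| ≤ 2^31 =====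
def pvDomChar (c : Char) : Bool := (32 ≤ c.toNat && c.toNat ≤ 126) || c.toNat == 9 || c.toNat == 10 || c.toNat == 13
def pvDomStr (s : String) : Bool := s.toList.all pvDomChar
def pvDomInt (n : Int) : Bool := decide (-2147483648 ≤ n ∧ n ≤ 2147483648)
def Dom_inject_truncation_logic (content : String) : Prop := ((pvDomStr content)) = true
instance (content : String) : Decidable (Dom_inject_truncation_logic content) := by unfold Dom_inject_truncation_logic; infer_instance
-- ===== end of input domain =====

-- B replaces A's line-split loop by substring search on the raw string: find the next
-- marker occurrence, find the end of its line, emit the text up to there plus one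
-- precomputed block constant, and continue on the remaining suffix (objective: alternative).

-- ===== PORT A =====
-- lines = content.split('\n'); sep "\n" ≠ "" so split? never raises; getD [] is unreachable
def inject_truncation_logic (content : String) : String :=
  let lines := (PySem.Str.split? content "\n").getD []
  let modified_lines := lines.foldl (fun acc line =>
    -- modified_lines.append(line)
    let acc := acc ++ [line]
    if PySem.Str.isIn "enc_input_tokens = self.tokenizer_src.encode(src_text).ids" line then
      -- the twelve successive modified_lines.append(…) of the truncation block, then continue
      acc ++ ["        dec_input_tokens = self.tokenizer_tgt.encode(tgt_text).ids",
              "",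
              "        # TRUNCATE LONG SEQUENCES TO FIT seq_len",
              "        max_src_len = self.seq_len - 2  # Account for SOS/EOS tokens",
              "        max_tgt_len = self.seq_len - 1  # Account for SOS token",
              "        ",
              "        if len(enc_input_tokens) > max_src_len:",
              "            enc_input_tokens = enc_input_tokens[:max_src_len]",
              "            ",
              "        if len(dec_input_tokens) > max_tgt_len:",
              "            dec_input_tokens = dec_input_tokens[:max_tgt_len]",
              ""]
    else if PySem.Str.isIn "dec_input_tokens = self.tokenizer_tgt.encode(tgt_text).ids" line then
      -- continue (the line was already appended above)
      acc
    else
      acc) []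
  PySem.Str.join "\n" modified_lines

-- ===== PORT B =====
-- B works on the raw string; the port works on its code-point list (PySem.Chars).
def pvMarker : String := "enc_input_tokens = self.tokenizer_src.encode(src_text).ids"

-- _BLOCK = '\n'.join([...])
def pvBlockLines : List String :=
  ["        dec_input_tokens = self.tokenizer_tgt.encode(tgt_text).ids",
   "",
   "        # TRUNCATE LONG SEQUENCES TO FIT seq_len",
   "        max_src_len = self.seq_len - 2  # Account for SOS/EOS tokens",
   "        max_tgt_len = self.seq_len - 1  # Account for SOS token",
   "        ",
   "        if len(enc_input_tokens) > max_src_len:",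
   "            enc_input_tokens = enc_input_tokens[:max_src_len]",
   "            ",
   "        if len(dec_input_tokens) > max_tgt_len:",
   "            dec_input_tokens = dec_input_tokens[:max_tgt_len]",
   ""]

def pvBlockStr : String := PySem.Str.join "\n" pvBlockLines

-- termination fact for the while loop: rest[j:] is strictly shorter (cited in decreasing_by)
lemma pv_drop_lt (rest : List Char)
    (hi : ¬ PySem.Chars.find rest pvMarker.toList = -1)
    (hj : ¬ PySem.Chars.findFrom rest ['\n']
        (PySem.Chars.find rest pvMarker.toList + (pvMarker.toList.length : Int)) = -1) :
    (List.drop (PySem.Chars.findFrom rest ['\n']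
        (PySem.Chars.find rest pvMarker.toList + (pvMarker.toList.length : Int))).toNat rest).length
      < rest.length := by
  have hm : pvMarker.toList.length = 58 := by decide
  have h0 : -1 ≤ PySem.Chars.find rest pvMarker.toList := PySem.Chars.neg_one_le_find rest pvMarker.toList
  have hpos : 0 ≤ PySem.Chars.find rest pvMarker.toList := by omega
  have hspec := (PySem.Chars.find_spec hpos).1
  have hlen : (PySem.Chars.find rest pvMarker.toList).toNat + 58 ≤ rest.length := by
    have := hspec.length_le
    simp only [List.length_drop, hm] at this
    omega
  have hcast : PySem.Chars.find rest pvMarker.toList + (pvMarker.toList.length : Int)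
      = (((PySem.Chars.find rest pvMarker.toList).toNat + 58 : Nat) : Int) := by
    rw [hm]; omega
  rw [hcast] at hj ⊢
  have hsp := PySem.Chars.findFrom_natCast_spec rest ['\n']
    ((PySem.Chars.find rest pvMarker.toList).toNat + 58) hlen hj
  have h1 := hsp.1
  have h2 : -1 ≤ PySem.Chars.findFrom rest ['\n']
      (((PySem.Chars.find rest pvMarker.toList).toNat + 58 : Nat) : Int) := by omega
  simp only [List.length_drop]
  omega

-- the while loop of B: out accumulates emitted pieces, rest is the remaining suffix
def pvAltGo (rest : List Char) (out : List (List Char)) : List (List Char) :=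
  -- i = rest.find(_MARKER)
  let i := PySem.Chars.find rest pvMarker.toList
  if hi : i = -1 then out ++ [rest]
  else
    -- j = rest.find('\n', i + len(_MARKER))
    let j := PySem.Chars.findFrom rest ['\n'] (i + (pvMarker.toList.length : Int))
    if hj : j = -1 then out ++ [rest ++ '\n' :: pvBlockStr.toList]
    else
      -- rest[:j] / rest[j:]: j is a nonnegative in-range index here, so the slices are take/drop
      pvAltGo (List.drop j.toNat rest) (out ++ [List.take j.toNat rest ++ '\n' :: pvBlockStr.toList])
termination_by rest.length
decreasing_by exact pv_drop_lt rest hi hj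

-- ''.join(out): joining on the empty separator is concatenation
def inject_truncation_logic_alt (content : String) : String :=
  String.ofList (PySem.Chars.join [] (pvAltGo content.toList []))

-- ===== PRECONDITION & SPEC =====
def Spec_inject_truncation_logic (content : String) (out : String) : Prop := out = inject_truncation_logic_alt content
instance (content : String) (out : String) : Decidable (Spec_inject_truncation_logic content out) := by unfold Spec_inject_truncation_logic; infer_instance

-- ===== CLAIM (what is proved, stated in full; the proofs are below) =====
def Claim_equal_inject_truncation_logic : Prop := ∀ (content : String), Dom_inject_truncation_logic content → Spec_inject_truncation_logic content (inject_truncation_logic content)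

-- ===== LEMMAS AND PROOFS =====

-- what one source line contributes to A's output list (Str level)
def pvChunk (line : String) : List String :=
  if PySem.Str.isIn pvMarker line then line :: pvBlockLines else [line]

-- per-line effect, Str level
def pvLineB (line : String) : String :=
  if PySem.Str.isIn pvMarker line then line ++ "\n" ++ pvBlockStr else line

-- per-line effect, Chars level
def pvLineC (l : List Char) : List Char :=
  if PySem.Chars.isIn pvMarker.toList l then l ++ '\n' :: pvBlockStr.toList else l

-- reference line splitter (Python's s.split('\n')), structural
def pvConsH (p : List Char) : List (List Char) → List (List Char)
  | [] => [p]
  | x :: xs => (p ++ x) :: xs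

def pvLines : List Char → List (List Char)
  | [] => [[]]
  | c :: rest => if c = '\n' then [] :: pvLines rest else pvConsH [c] (pvLines rest)

-- ---- A-side: the foldl flattens the chunks ----
theorem pv_foldA (ls : List String) (acc : List String) :
    ls.foldl (fun acc line =>
      let acc := acc ++ [line]
      if PySem.Str.isIn "enc_input_tokens = self.tokenizer_src.encode(src_text).ids" line then
        acc ++ ["        dec_input_tokens = self.tokenizer_tgt.encode(tgt_text).ids",
              "",
              "        # TRUNCATE LONG SEQUENCES TO FIT seq_len",
              "        max_src_len = self.seq_len - 2  # Account for SOS/EOS tokens",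
              "        max_tgt_len = self.seq_len - 1  # Account for SOS token",
              "        ",
              "        if len(enc_input_tokens) > max_src_len:",
              "            enc_input_tokens = enc_input_tokens[:max_src_len]",
              "            ",
              "        if len(dec_input_tokens) > max_tgt_len:",
              "            dec_input_tokens = dec_input_tokens[:max_tgt_len]",
              ""]
      else if PySem.Str.isIn "dec_input_tokens = self.tokenizer_tgt.encode(tgt_text).ids" line then
        acc
      else acc) acc
    = acc ++ ls.flatMap pvChunk := by
  induction ls generalizing acc with
  | nil => simp
  | cons l ls ih =>
    simp only [List.foldl_cons, List.flatMap_cons, ih, pvChunk, pvBlockLines, pvMarker]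
    split_ifs <;> simp

-- join over nonempty ++ nonempty splits with one separator in between
theorem pv_join_append (sep : List Char) (xs ys : List (List Char)) (hx : xs ≠ []) (hy : ys ≠ []) :
    PySem.Chars.join sep (xs ++ ys) = PySem.Chars.join sep xs ++ sep ++ PySem.Chars.join sep ys := by
  induction xs with
  | nil => exact absurd rfl hx
  | cons a xs ih =>
    cases xs with
    | nil =>
      cases ys with
      | nil => exact absurd rfl hy
      | cons b ys =>
        simp only [List.singleton_append]
        rw [PySem.Chars.join_cons_cons, PySem.Chars.join_singleton]
    | cons b xs =>
      have h := ih (by simp)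
      simp only [List.cons_append] at h ⊢
      rw [PySem.Chars.join_cons_cons, PySem.Chars.join_cons_cons, h]
      simp [List.append_assoc]

theorem pv_chunk_ne_nil (l : String) : pvChunk l ≠ [] := by
  unfold pvChunk; split_ifs <;> simp

theorem pv_flatMap_ne_nil (ls : List String) (h : ls ≠ []) : ls.flatMap pvChunk ≠ [] := by
  cases ls with
  | nil => exact absurd rfl h
  | cons l ls =>
    simp only [List.flatMap_cons]
    intro hc
    exact pv_chunk_ne_nil l (List.append_eq_nil_iff.mp hc).1

-- one line's chunk joins to the per-line effect
theorem pv_chunk_join (l : String) :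
    PySem.Chars.join "\n".toList ((pvChunk l).map String.toList) = (pvLineB l).toList := by
  unfold pvChunk pvLineB
  split_ifs with h
  · simp [pvBlockStr, pvBlockLines, PySem.Str.toList_join, String.toList_append,
      PySem.Chars.join_cons_cons, List.append_assoc]
  · simp [PySem.Chars.join_singleton]

theorem pv_key (ls : List String) :
    PySem.Chars.join "\n".toList ((ls.flatMap pvChunk).map String.toList)
      = PySem.Chars.join "\n".toList ((ls.map pvLineB).map String.toList) := by
  induction ls with
  | nil => rfl
  | cons l ls ih =>
    by_cases hls : ls = []
    · subst hls
      simp only [List.flatMap_cons, List.flatMap_nil, List.append_nil, List.map_cons,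
        List.map_nil]
      rw [PySem.Chars.join_singleton]
      exact pv_chunk_join l
    · have hflat : ls.flatMap pvChunk ≠ [] := pv_flatMap_ne_nil ls hls
      have hmap : ls.map pvLineB ≠ [] := by simpa using hls
      simp only [List.flatMap_cons, List.map_append, List.map_cons]
      rw [pv_join_append "\n".toList ((pvChunk l).map String.toList)
            ((ls.flatMap pvChunk).map String.toList)
            (by simpa using pv_chunk_ne_nil l) (by simpa using hflat)]
      rw [pv_chunk_join l, ih]
      cases hm : ls.map pvLineB with
      | nil => exact absurd hm hmap
      | cons b bs =>
        simp only [List.map_cons]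
        rw [PySem.Chars.join_cons_cons]

-- ---- pvLines basics ----
theorem pvLines_ne_nil (cs : List Char) : pvLines cs ≠ [] := by
  cases cs with
  | nil => simp [pvLines]
  | cons c rest =>
    simp only [pvLines]
    split_ifs
    · simp
    · cases h : pvLines rest <;> simp [pvConsH]

theorem pvConsH_assoc (p q : List Char) (L : List (List Char)) :
    pvConsH (p ++ q) L = pvConsH p (pvConsH q L) := by
  cases L <;> simp [pvConsH]

theorem pv_join_consH (c : Char) (L : List (List Char)) (h : L ≠ []) :
    PySem.Chars.join ['\n'] (pvConsH [c] L) = c :: PySem.Chars.join ['\n'] L := by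
  cases L with
  | nil => exact absurd rfl h
  | cons x xs =>
    cases xs with
    | nil => simp [pvConsH, PySem.Chars.join_singleton]
    | cons y ys =>
      simp [pvConsH, PySem.Chars.join_cons_cons]

-- join '\n' of the lines is the string back
theorem pv_join_lines (cs : List Char) :
    PySem.Chars.join ['\n'] (pvLines cs) = cs := by
  induction cs with
  | nil => simp [pvLines, PySem.Chars.join_singleton]
  | cons c rest ih =>
    simp only [pvLines]
    split_ifs with hc
    · subst hc
      cases h : pvLines rest with
      | nil => exact absurd h (pvLines_ne_nil rest)
      | cons x xs =>
        rw [← h, show ([] : List Char) :: pvLines rest = [[]] ++ pvLines rest from rfl,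
          pv_join_append ['\n'] [[]] (pvLines rest) (by simp) (pvLines_ne_nil rest),
          PySem.Chars.join_singleton, ih]
        rfl
    · rw [pv_join_consH c (pvLines rest) (pvLines_ne_nil rest), ih]

-- every line piece is an infix; the head piece is a prefix
theorem pvLines_head_prefix (cs : List Char) :
    ∃ h t, pvLines cs = h :: t ∧ h <+: cs ∧ ∀ x ∈ t, x <:+: cs := by
  induction cs with
  | nil => exact ⟨[], [], rfl, List.nil_prefix, by simp⟩
  | cons c rest ih =>
    obtain ⟨h, t, heq, hpre, hinf⟩ := ih
    by_cases hc : c = '\n'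
    · subst hc
      refine ⟨[], pvLines rest, by simp [pvLines], List.nil_prefix, ?_⟩
      intro x hx
      rw [heq] at hx
      rcases List.mem_cons.mp hx with rfl | hx
      · exact List.infix_cons hpre.isInfix
      · exact List.infix_cons (hinf x hx)
    · refine ⟨c :: h, t, by simp [pvLines, hc, heq, pvConsH], ?_, ?_⟩
      · exact List.cons_prefix_cons.mpr ⟨rfl, hpre⟩
      · intro x hx; exact List.infix_cons (hinf x hx)

theorem pvLines_mem_infix (cs x : List Char) (hx : x ∈ pvLines cs) : x <:+: cs := by
  obtain ⟨h, t, heq, hpre, hinf⟩ := pvLines_head_prefix cs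
  rw [heq] at hx
  rcases List.mem_cons.mp hx with rfl | hx
  · exact hpre.isInfix
  · exact hinf x hx

-- splitting at a newline with a newline-free first part
theorem pvLines_append (l rest : List Char) (hl : '\n' ∉ l) :
    pvLines (l ++ '\n' :: rest) = l :: pvLines rest := by
  induction l with
  | nil => simp [pvLines]
  | cons c l ih =>
    have hc : c ≠ '\n' := fun h => hl (h ▸ List.mem_cons_self)
    have hl' : '\n' ∉ l := fun h => hl (List.mem_cons_of_mem _ h)
    simp [List.cons_append, pvLines, if_neg hc, ih hl', pvConsH]

theorem pvLines_no_nl (cs : List Char) (h : '\n' ∉ cs) : pvLines cs = [cs] := by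
  induction cs with
  | nil => rfl
  | cons c rest ih =>
    have hc : c ≠ '\n' := fun hh => h (hh ▸ List.mem_cons_self)
    simp [pvLines, hc, ih (fun hh => h (List.mem_cons_of_mem _ hh)), pvConsH]

-- ---- splitOn = pvLines ----
theorem pv_go_eq (fuel : Nat) : ∀ (cs : List Char), cs.length < fuel → ∀ cur acc,
    PySem.Chars.splitOn.go ['\n'] fuel cs cur acc
      = acc.reverse ++ pvConsH cur.reverse (pvLines cs) := by
  induction fuel with
  | zero => intro cs h; exact absurd h (Nat.not_lt_zero _)
  | succ n ih =>
    intro cs h cur acc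
    cases cs with
    | nil =>
      rw [show PySem.Chars.splitOn.go ['\n'] (n+1) [] cur acc = (cur.reverse :: acc).reverse from rfl]
      simp [pvLines, pvConsH]
    | cons c rest =>
      rw [show PySem.Chars.splitOn.go ['\n'] (n+1) (c :: rest) cur acc
          = (if ['\n'].isPrefixOf (c :: rest) = true
             then PySem.Chars.splitOn.go ['\n'] n (List.drop ['\n'].length (c :: rest)) []
               (cur.reverse :: acc)
             else PySem.Chars.splitOn.go ['\n'] n rest (c :: cur) acc) from rfl]
      by_cases hc : c = '\n'
      · subst hc
        rw [if_pos (by simp [List.isPrefixOf])]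
        rw [show List.drop ['\n'].length ('\n' :: rest) = rest from rfl,
          ih rest (by simpa using Nat.lt_of_succ_lt_succ h) [] (cur.reverse :: acc)]
        obtain ⟨x, xs, hx⟩ : ∃ x xs, pvLines rest = x :: xs := by
          cases hh : pvLines rest with
          | nil => exact absurd hh (pvLines_ne_nil rest)
          | cons x xs => exact ⟨x, xs, rfl⟩
        simp [pvLines, hx, pvConsH]
      · rw [if_neg (by simp [List.isPrefixOf]; exact fun hh => absurd hh.symm hc)]
        rw [ih rest (by simpa using Nat.lt_of_succ_lt_succ h) (c :: cur) acc]
        rw [List.reverse_cons, pvConsH_assoc]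
        simp [pvLines, hc]

theorem pv_splitOn_eq_pvLines (cs : List Char) :
    PySem.Chars.splitOn cs ['\n'] = pvLines cs := by
  unfold PySem.Chars.splitOn
  rw [pv_go_eq (cs.length + 1) cs (Nat.lt_succ_self _) [] []]
  obtain ⟨x, xs, hx⟩ : ∃ x xs, pvLines cs = x :: xs := by
    cases hh : pvLines cs with
    | nil => exact absurd hh (pvLines_ne_nil cs)
    | cons x xs => exact ⟨x, xs, rfl⟩
  simp [hx, pvConsH]

-- ---- find facts ----
theorem pv_find_eq_of (cs sub : List Char) (p : Nat)
    (h1 : sub <+: cs.drop p) (h2 : ∀ q < p, ¬ sub <+: cs.drop q) :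
    PySem.Chars.find cs sub = p := by
  have hinfix : sub <:+: cs := h1.isInfix.trans (List.drop_suffix p cs).isInfix
  have hpos : 0 ≤ PySem.Chars.find cs sub := (PySem.Chars.find_nonneg_iff cs sub).mpr hinfix
  have hs := PySem.Chars.find_spec hpos
  have hle : (PySem.Chars.find cs sub).toNat ≤ p := by
    by_contra hlt
    exact hs.2 p (by omega) h1
  have hge : p ≤ (PySem.Chars.find cs sub).toNat := by
    by_contra hlt
    exact h2 (PySem.Chars.find cs sub).toNat (by omega) hs.1
  omega

-- first '\n' after a newline-free prefix
theorem pv_find_nl (xs ys : List Char) (hx : '\n' ∉ xs) :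
    PySem.Chars.find (xs ++ '\n' :: ys) ['\n'] = xs.length := by
  apply pv_find_eq_of
  · rw [List.drop_append, List.drop_length, Nat.sub_self, List.drop_zero, List.nil_append]
    exact List.cons_prefix_iff.mpr ⟨ys, rfl, List.nil_prefix⟩
  · intro q hq hpre
    rw [List.drop_append, Nat.sub_eq_zero_of_le (Nat.le_of_lt hq), List.drop_zero] at hpre
    obtain ⟨l', hl', -⟩ := List.cons_prefix_iff.mp hpre
    have hhead : (List.drop q xs ++ '\n' :: ys).head? = some '\n' := by rw [hl']; rfl
    have hne : List.drop q xs ≠ [] := by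
      simp [List.drop_eq_nil_iff]; omega
    rw [List.head?_append_of_ne_nil _ hne, List.head?_drop] at hhead
    exact hx (List.mem_of_getElem? hhead)

-- no occurrence of the marker crosses the newline
theorem pv_no_cross (l rest : List Char) (p : Nat) (hl : '\n' ∉ l)
    (h : pvMarker.toList <+: (l ++ '\n' :: rest).drop p) :
    (p + 58 ≤ l.length ∧ pvMarker.toList <+: l.drop p) ∨
      (l.length + 1 ≤ p ∧ pvMarker.toList <+: rest.drop (p - l.length - 1)) := by
  have hnlM : '\n' ∉ pvMarker.toList := by decide
  have hMlen : pvMarker.toList.length = 58 := by decide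
  rcases le_or_gt p l.length with hp | hp
  · rw [List.drop_append, Nat.sub_eq_zero_of_le hp, List.drop_zero] at h
    rcases le_or_gt (p + 58) l.length with h58 | h58
    · left
      refine ⟨h58, ?_⟩
      have hM := List.prefix_iff_eq_take.mp h
      rw [hMlen, List.take_append] at hM
      rw [List.length_drop] at hM
      rw [Nat.sub_eq_zero_of_le (by omega), List.take_zero, List.append_nil] at hM
      exact List.prefix_iff_eq_take.mpr (by rw [hMlen]; exact hM)
    · exfalso
      apply hnlM
      have hM := List.prefix_iff_eq_take.mp h
      have ht : l.length - p < 58 := by omega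
      have hlen2 : l.length - p < (List.drop p l ++ '\n' :: rest).length := by
        simp only [List.length_append, List.length_drop, List.length_cons]; omega
      have hlt : l.length - p < (List.take pvMarker.toList.length
          (List.drop p l ++ '\n' :: rest)).length := by
        simp only [List.length_take, hMlen]
        omega
      have hval : (List.take pvMarker.toList.length (List.drop p l ++ '\n' :: rest))[l.length - p] = '\n' := by
        rw [List.getElem_take]
        rw [List.getElem_append_right (by simp only [List.length_drop]; omega)]
        simp only [List.length_drop]
        simp only [show l.length - p - (l.length - p) = 0 from by omega]
        rfl
      have hmem : '\n' ∈ List.take pvMarker.toList.length (List.drop p l ++ '\n' :: rest) :=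
        List.mem_of_getElem hval
      rw [← hM] at hmem
      exact hmem
  · right
    refine ⟨by omega, ?_⟩
    rw [List.drop_append, List.drop_eq_nil_of_le (by omega), List.nil_append,
      show p - l.length = (p - l.length - 1) + 1 from by omega, List.drop_succ_cons] at h
    exact h

-- ---- B-side main lemma ----
theorem pvAltGo_eq1 (cs : List Char) (out : List (List Char))
    (h1 : PySem.Chars.find cs pvMarker.toList = -1) :
    pvAltGo cs out = out ++ [cs] := by
  rw [pvAltGo]; simp only [dif_pos h1]

theorem pvAltGo_eq2 (cs : List Char) (out : List (List Char))
    (h1 : ¬ PySem.Chars.find cs pvMarker.toList = -1)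
    (h2 : PySem.Chars.findFrom cs ['\n']
      (PySem.Chars.find cs pvMarker.toList + (pvMarker.toList.length : Int)) = -1) :
    pvAltGo cs out = out ++ [cs ++ '\n' :: pvBlockStr.toList] := by
  rw [pvAltGo]; simp only [dif_neg h1, dif_pos h2]

theorem pvAltGo_eq3 (cs : List Char) (out : List (List Char))
    (h1 : ¬ PySem.Chars.find cs pvMarker.toList = -1)
    (h2 : ¬ PySem.Chars.findFrom cs ['\n']
      (PySem.Chars.find cs pvMarker.toList + (pvMarker.toList.length : Int)) = -1) :
    pvAltGo cs out = pvAltGo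
      (List.drop (PySem.Chars.findFrom cs ['\n']
        (PySem.Chars.find cs pvMarker.toList + (pvMarker.toList.length : Int))).toNat cs)
      (out ++ [List.take (PySem.Chars.findFrom cs ['\n']
        (PySem.Chars.find cs pvMarker.toList + (pvMarker.toList.length : Int))).toNat cs
        ++ '\n' :: pvBlockStr.toList]) := by
  rw [pvAltGo]; simp only [dif_neg h1, dif_neg h2]

-- decompose a string at its first newline
theorem pv_decomp (cs : List Char) :
    ('\n' ∉ cs) ∨ ∃ l rest, cs = l ++ '\n' :: rest ∧ '\n' ∉ l := by
  induction cs with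
  | nil => exact Or.inl (by simp)
  | cons c cs' ih =>
    by_cases hc : c = '\n'
    · exact Or.inr ⟨[], cs', by rw [hc]; rfl, by simp⟩
    · rcases ih with h | ⟨l, rest, rfl, hl⟩
      · exact Or.inl (by simp [h]; exact fun hh => hc hh.symm)
      · exact Or.inr ⟨c :: l, rest, rfl, by simp [hl]; exact fun hh => hc hh.symm⟩

theorem pv_join_cons (x : List Char) (L : List (List Char)) (h : L ≠ []) :
    PySem.Chars.join ['\n'] (x :: L) = x ++ '\n' :: PySem.Chars.join ['\n'] L := by
  rw [show x :: L = [x] ++ L from rfl, pv_join_append ['\n'] [x] L (by simp) h,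
    PySem.Chars.join_singleton]
  simp

theorem pvAltGo_acc (n : Nat) : ∀ (cs : List Char), cs.length ≤ n → ∀ out,
    pvAltGo cs out = out ++ pvAltGo cs [] := by
  induction n with
  | zero =>
    intro cs hc out
    have hcs : cs = [] := List.eq_nil_of_length_eq_zero (Nat.le_zero.mp hc)
    subst hcs
    rw [pvAltGo_eq1 [] out (by decide), pvAltGo_eq1 [] [] (by decide)]; simp
  | succ n ih =>
    intro cs hc out
    by_cases h1 : PySem.Chars.find cs pvMarker.toList = -1
    · rw [pvAltGo_eq1 cs out h1, pvAltGo_eq1 cs [] h1]; simp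
    · by_cases h2 : PySem.Chars.findFrom cs ['\n']
          (PySem.Chars.find cs pvMarker.toList + (pvMarker.toList.length : Int)) = -1
      · rw [pvAltGo_eq2 cs out h1 h2, pvAltGo_eq2 cs [] h1 h2]; simp
      · rw [pvAltGo_eq3 cs out h1 h2, pvAltGo_eq3 cs [] h1 h2]
        have hlt := pv_drop_lt cs h1 h2
        rw [ih _ (by omega) (out ++ _), ih _ (by omega) ([] ++ _)]
        simp

theorem pv_main (n : Nat) : ∀ (cs : List Char), cs.length ≤ n →
    (pvAltGo cs []).flatten = PySem.Chars.join ['\n'] ((pvLines cs).map pvLineC) := by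
  induction n with
  | zero =>
    intro cs hlen
    have hcs : cs = [] := List.eq_nil_of_length_eq_zero (Nat.le_zero.mp hlen)
    subst hcs
    rw [pvAltGo_eq1 [] [] (by decide)]
    rw [show pvLines [] = [[]] from rfl, List.map_cons, List.map_nil,
      PySem.Chars.join_singleton, show pvLineC [] = [] from by decide]
    rfl
  | succ n ih =>
    intro cs hlen
    have hMlen : pvMarker.toList.length = 58 := by decide
    by_cases h1 : PySem.Chars.find cs pvMarker.toList = -1
    · rw [pvAltGo_eq1 cs [] h1]
      have hnoM : ¬ pvMarker.toList <:+: cs := (PySem.Chars.find_eq_neg_one_iff cs _).mp h1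
      have hmap : (pvLines cs).map pvLineC = pvLines cs := by
        have hcg : ∀ x ∈ pvLines cs, pvLineC x = id x := by
          intro x hx
          unfold pvLineC
          rw [if_neg]
          · rfl
          · intro hin
            exact hnoM (((PySem.Chars.isIn_iff_infix _ _).mp hin).trans (pvLines_mem_infix cs x hx))
        rw [List.map_congr_left hcg, List.map_id]
      rw [hmap, pv_join_lines]
      simp
    · have hpos : 0 ≤ PySem.Chars.find cs pvMarker.toList := by
        have := PySem.Chars.neg_one_le_find cs pvMarker.toList; omega
      have hspec := PySem.Chars.find_spec hpos
      have hocc := hspec.1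
      have hklen : (PySem.Chars.find cs pvMarker.toList).toNat + 58 ≤ cs.length := by
        have := hocc.length_le; simp only [List.length_drop, hMlen] at this; omega
      have hcast : PySem.Chars.find cs pvMarker.toList + (pvMarker.toList.length : Int)
          = (((PySem.Chars.find cs pvMarker.toList).toNat + 58 : Nat) : Int) := by
        rw [hMlen]; omega
      rcases pv_decomp cs with hnl | ⟨l, rest, rfl, hl⟩
      · -- no newline at all: single line containing the marker
        have hIn : PySem.Chars.isIn pvMarker.toList cs = true :=
          (PySem.Chars.isIn_iff_infix _ _).mpr ((PySem.Chars.find_nonneg_iff cs _).mp hpos)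
        have hffneg : PySem.Chars.findFrom cs ['\n']
            (((PySem.Chars.find cs pvMarker.toList).toNat + 58 : Nat) : Int) = -1 := by
          rw [PySem.Chars.findFrom_natCast_eq_neg_one_iff cs ['\n'] _ hklen]
          intro hin
          exact hnl (List.mem_of_mem_drop ((List.singleton_infix_iff _ _).mp hin))
        rw [pvAltGo_eq2 cs [] h1 (by rw [hcast]; exact hffneg)]
        rw [pvLines_no_nl cs hnl]
        rw [List.map_cons, List.map_nil, PySem.Chars.join_singleton,
          show pvLineC cs = cs ++ '\n' :: pvBlockStr.toList from by unfold pvLineC; rw [if_pos hIn]]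
        simp
      · -- cs = l ++ '\n' :: rest with '\n' ∉ l
        have hllen : l.length + 1 + rest.length ≤ n + 1 := by
          have h := hlen; simp at h; omega
        by_cases hMl : PySem.Chars.isIn pvMarker.toList l = true
        · -- marker inside the first line: the line end is at l.length
          obtain ⟨p, hp⟩ := (PySem.Chars.exists_prefix_drop_iff_isIn pvMarker.toList l).mpr hMl
          have hpl : p + 58 ≤ l.length := by
            have h2 := hp.length_le; simp only [List.length_drop, hMlen] at h2; omega
          have hcsp : pvMarker.toList <+: (l ++ '\n' :: rest).drop p := by
            rw [List.drop_append, Nat.sub_eq_zero_of_le (by omega), List.drop_zero]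
            exact hp.trans (List.prefix_append _ _)
          have hile : (PySem.Chars.find (l ++ '\n' :: rest) pvMarker.toList).toNat ≤ p := by
            by_contra hq
            exact hspec.2 p (by omega) hcsp
          have hi58 : (PySem.Chars.find (l ++ '\n' :: rest) pvMarker.toList).toNat + 58 ≤ l.length := by
            rcases pv_no_cross l rest (PySem.Chars.find (l ++ '\n' :: rest) pvMarker.toList).toNat hl hocc with ⟨h58, -⟩ | ⟨hge, -⟩
            · exact h58
            · omega
          have hffval : PySem.Chars.findFrom (l ++ '\n' :: rest) ['\n']
              ((((PySem.Chars.find (l ++ '\n' :: rest) pvMarker.toList).toNat + 58 : Nat)) : Int)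
                = (l.length : Int) := by
            rw [PySem.Chars.findFrom_natCast _ _ _ hklen]
            have hdropk : (l ++ '\n' :: rest).drop ((PySem.Chars.find (l ++ '\n' :: rest) pvMarker.toList).toNat + 58)
                = l.drop ((PySem.Chars.find (l ++ '\n' :: rest) pvMarker.toList).toNat + 58) ++ '\n' :: rest := by
              rw [List.drop_append, Nat.sub_eq_zero_of_le hi58, List.drop_zero]
            rw [hdropk, pv_find_nl _ rest (fun hm => hl (List.mem_of_mem_drop hm))]
            rw [if_neg (by omega)]
            simp only [List.length_drop]
            omega
          have hffne : ¬ PySem.Chars.findFrom (l ++ '\n' :: rest) ['\n']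
              (PySem.Chars.find (l ++ '\n' :: rest) pvMarker.toList + (pvMarker.toList.length : Int)) = -1 := by
            rw [hcast, hffval]; omega
          rw [pvAltGo_eq3 _ [] h1 hffne]
          rw [hcast, hffval, Int.toNat_natCast, List.take_left, List.drop_left]
          rw [pvAltGo_acc (rest.length + 1) ('\n' :: rest) (by simp) _]
          have hih := ih ('\n' :: rest) (by simp only [List.length_cons]; omega)
          rw [List.flatten_append, hih]
          rw [pvLines_append l rest hl]
          rw [show pvLines ('\n' :: rest) = [] :: pvLines rest from by simp [pvLines]]
          rw [List.map_cons, List.map_cons]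
          rw [pv_join_cons (pvLineC l) _ (by simp [pvLines_ne_nil rest]),
            pv_join_cons (pvLineC []) _ (by simp [pvLines_ne_nil rest])]
          rw [show pvLineC [] = [] from by decide,
            show pvLineC l = l ++ '\n' :: pvBlockStr.toList from by unfold pvLineC; rw [if_pos hMl]]
          simp
        · -- marker beyond the first line: step over the first line
          have hMnl : ¬ pvMarker.toList <:+: l := by
            intro hin
            exact absurd ((PySem.Chars.isIn_iff_infix _ _).mpr hin) (by simpa using hMl)
          have hstep : (pvAltGo (l ++ '\n' :: rest) []).flatten
              = l ++ '\n' :: (pvAltGo rest []).flatten := by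
            have hrpre : pvMarker.toList <+:
                rest.drop ((PySem.Chars.find (l ++ '\n' :: rest) pvMarker.toList).toNat - l.length - 1) ∧
                l.length + 1 ≤ (PySem.Chars.find (l ++ '\n' :: rest) pvMarker.toList).toNat := by
              rcases pv_no_cross l rest (PySem.Chars.find (l ++ '\n' :: rest) pvMarker.toList).toNat hl hocc with ⟨h58, hpre⟩ | ⟨hge, hpre⟩
              · exact absurd (hpre.isInfix.trans (List.drop_suffix _ l).isInfix) hMnl
              · exact ⟨hpre, hge⟩
            have hrinf : pvMarker.toList <:+: rest :=
              hrpre.1.isInfix.trans (List.drop_suffix _ rest).isInfix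
            have hi'pos : 0 ≤ PySem.Chars.find rest pvMarker.toList :=
              (PySem.Chars.find_nonneg_iff rest _).mpr hrinf
            have hspec' := PySem.Chars.find_spec hi'pos
            have h1' : ¬ PySem.Chars.find rest pvMarker.toList = -1 := by omega
            have hk' : (PySem.Chars.find rest pvMarker.toList).toNat + 58 ≤ rest.length := by
              have := hspec'.1.length_le; simp only [List.length_drop, hMlen] at this; omega
            have hcast' : PySem.Chars.find rest pvMarker.toList + (pvMarker.toList.length : Int)
                = (((PySem.Chars.find rest pvMarker.toList).toNat + 58 : Nat) : Int) := by
              rw [hMlen]; omega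
            have hieq : (PySem.Chars.find (l ++ '\n' :: rest) pvMarker.toList).toNat
                = l.length + 1 + (PySem.Chars.find rest pvMarker.toList).toNat := by
              have hoc : pvMarker.toList <+:
                  (l ++ '\n' :: rest).drop (l.length + 1 + (PySem.Chars.find rest pvMarker.toList).toNat) := by
                rw [List.drop_append, List.drop_eq_nil_of_le (by omega), List.nil_append,
                  show l.length + 1 + (PySem.Chars.find rest pvMarker.toList).toNat - l.length
                    = (PySem.Chars.find rest pvMarker.toList).toNat + 1 from by omega,
                  List.drop_succ_cons]
                exact hspec'.1
              have hle1 : (PySem.Chars.find (l ++ '\n' :: rest) pvMarker.toList).toNat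
                  ≤ l.length + 1 + (PySem.Chars.find rest pvMarker.toList).toNat := by
                by_contra hq
                exact hspec.2 _ (by omega) hoc
              have hle2 : (PySem.Chars.find rest pvMarker.toList).toNat
                  ≤ (PySem.Chars.find (l ++ '\n' :: rest) pvMarker.toList).toNat - l.length - 1 := by
                by_contra hq
                exact hspec'.2 _ (by omega) hrpre.1
              omega
            have hdropk : (l ++ '\n' :: rest).drop ((PySem.Chars.find (l ++ '\n' :: rest) pvMarker.toList).toNat + 58)
                = rest.drop ((PySem.Chars.find rest pvMarker.toList).toNat + 58) := by
              rw [List.drop_append, List.drop_eq_nil_of_le (by omega), List.nil_append,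
                show (PySem.Chars.find (l ++ '\n' :: rest) pvMarker.toList).toNat + 58 - l.length
                  = ((PySem.Chars.find rest pvMarker.toList).toNat + 58) + 1 from by omega,
                List.drop_succ_cons]
            have hffcs := PySem.Chars.findFrom_natCast (l ++ '\n' :: rest) ['\n']
              ((PySem.Chars.find (l ++ '\n' :: rest) pvMarker.toList).toNat + 58) hklen
            have hffrest := PySem.Chars.findFrom_natCast rest ['\n']
              ((PySem.Chars.find rest pvMarker.toList).toNat + 58) hk'
            rw [hdropk] at hffcs
            by_cases hfnl : PySem.Chars.find (rest.drop ((PySem.Chars.find rest pvMarker.toList).toNat + 58)) ['\n'] = -1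
            · rw [if_pos hfnl] at hffcs hffrest
              rw [pvAltGo_eq2 _ [] h1 (by rw [hcast]; exact hffcs),
                pvAltGo_eq2 rest [] h1' (by rw [hcast']; exact hffrest)]
              simp
            · rw [if_neg hfnl] at hffcs hffrest
              have hf0 : 0 ≤ PySem.Chars.find (rest.drop ((PySem.Chars.find rest pvMarker.toList).toNat + 58)) ['\n'] := by
                have := PySem.Chars.neg_one_le_find (rest.drop ((PySem.Chars.find rest pvMarker.toList).toNat + 58)) ['\n']
                omega
              have hffcs' : ¬ PySem.Chars.findFrom (l ++ '\n' :: rest) ['\n']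
                  (PySem.Chars.find (l ++ '\n' :: rest) pvMarker.toList + (pvMarker.toList.length : Int)) = -1 := by
                rw [hcast, hffcs]; omega
              have hffrest' : ¬ PySem.Chars.findFrom rest ['\n']
                  (PySem.Chars.find rest pvMarker.toList + (pvMarker.toList.length : Int)) = -1 := by
                rw [hcast', hffrest]; omega
              rw [pvAltGo_eq3 _ [] h1 hffcs', pvAltGo_eq3 rest [] h1' hffrest']
              rw [hcast, hcast', hffcs, hffrest]
              have htn : ((((PySem.Chars.find (l ++ '\n' :: rest) pvMarker.toList).toNat + 58 : Nat) : Int)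
                  + PySem.Chars.find (rest.drop ((PySem.Chars.find rest pvMarker.toList).toNat + 58)) ['\n']).toNat
                  = l.length + 1 + ((((PySem.Chars.find rest pvMarker.toList).toNat + 58 : Nat) : Int) + PySem.Chars.find (rest.drop ((PySem.Chars.find rest pvMarker.toList).toNat + 58)) ['\n']).toNat := by
                omega
              rw [htn]
              have htake : (l ++ '\n' :: rest).take (l.length + 1 + ((((PySem.Chars.find rest pvMarker.toList).toNat + 58 : Nat) : Int) + PySem.Chars.find (rest.drop ((PySem.Chars.find rest pvMarker.toList).toNat + 58)) ['\n']).toNat)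
                  = l ++ '\n' :: rest.take ((((PySem.Chars.find rest pvMarker.toList).toNat + 58 : Nat) : Int) + PySem.Chars.find (rest.drop ((PySem.Chars.find rest pvMarker.toList).toNat + 58)) ['\n']).toNat := by
                rw [List.take_append, List.take_of_length_le (by omega),
                  show l.length + 1 + ((((PySem.Chars.find rest pvMarker.toList).toNat + 58 : Nat) : Int) + PySem.Chars.find (rest.drop ((PySem.Chars.find rest pvMarker.toList).toNat + 58)) ['\n']).toNat - l.length = ((((PySem.Chars.find rest pvMarker.toList).toNat + 58 : Nat) : Int) + PySem.Chars.find (rest.drop ((PySem.Chars.find rest pvMarker.toList).toNat + 58)) ['\n']).toNat + 1 from by omega, List.take_succ_cons]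
              have hdrop : (l ++ '\n' :: rest).drop (l.length + 1 + ((((PySem.Chars.find rest pvMarker.toList).toNat + 58 : Nat) : Int) + PySem.Chars.find (rest.drop ((PySem.Chars.find rest pvMarker.toList).toNat + 58)) ['\n']).toNat)
                  = rest.drop ((((PySem.Chars.find rest pvMarker.toList).toNat + 58 : Nat) : Int) + PySem.Chars.find (rest.drop ((PySem.Chars.find rest pvMarker.toList).toNat + 58)) ['\n']).toNat := by
                rw [List.drop_append, List.drop_eq_nil_of_le (by omega), List.nil_append,
                  show l.length + 1 + ((((PySem.Chars.find rest pvMarker.toList).toNat + 58 : Nat) : Int) + PySem.Chars.find (rest.drop ((PySem.Chars.find rest pvMarker.toList).toNat + 58)) ['\n']).toNat - l.length = ((((PySem.Chars.find rest pvMarker.toList).toNat + 58 : Nat) : Int) + PySem.Chars.find (rest.drop ((PySem.Chars.find rest pvMarker.toList).toNat + 58)) ['\n']).toNat + 1 from by omega, List.drop_succ_cons]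
              rw [htake, hdrop]
              rw [pvAltGo_acc rest.length (rest.drop ((((PySem.Chars.find rest pvMarker.toList).toNat + 58 : Nat) : Int) + PySem.Chars.find (rest.drop ((PySem.Chars.find rest pvMarker.toList).toNat + 58)) ['\n']).toNat)
                  (by simp only [List.length_drop]; omega) ([] ++ _),
                pvAltGo_acc rest.length (rest.drop ((((PySem.Chars.find rest pvMarker.toList).toNat + 58 : Nat) : Int) + PySem.Chars.find (rest.drop ((PySem.Chars.find rest pvMarker.toList).toNat + 58)) ['\n']).toNat)
                  (by simp only [List.length_drop]; omega) ([] ++ _)]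
              simp
          rw [hstep, ih rest (by omega)]
          rw [pvLines_append l rest hl, List.map_cons,
            pv_join_cons (pvLineC l) _ (by simp [pvLines_ne_nil rest])]
          rw [show pvLineC l = l from by unfold pvLineC; rw [if_neg (by simp [hMl])]]

-- join on the empty separator is flatten
theorem pv_join_nil_flatten (xss : List (List Char)) :
    PySem.Chars.join [] xss = xss.flatten := by
  induction xss with
  | nil => simp [PySem.Chars.join_nil]
  | cons x xs ih =>
    cases xs with
    | nil => simp [PySem.Chars.join_singleton]
    | cons y ys => rw [PySem.Chars.join_cons_cons, ih]; simp

-- Str-level line effect matches the Chars-level one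
theorem pv_lineB_toList (s : String) : (pvLineB s).toList = pvLineC s.toList := by
  unfold pvLineB pvLineC
  rw [PySem.Str.isIn_eq]
  split_ifs with h
  · simp [pvBlockStr]
  · rfl

-- ===== VERDICT (by name: the statement is the Claim_ definition above) =====
theorem inject_truncation_logic_spec : Claim_equal_inject_truncation_logic := by
  intro content _
  show inject_truncation_logic content = inject_truncation_logic_alt content
  apply String.toList_inj.mp
  unfold inject_truncation_logic inject_truncation_logic_alt
  have hsplit : ((PySem.Str.split? content "\n").getD []).map String.toList
      = PySem.Chars.splitOn content.toList ['\n'] := by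
    have h := PySem.Str.split?_map content "\n"
    rw [show PySem.Chars.split? content.toList "\n".toList
        = some (PySem.Chars.splitOn content.toList ['\n']) from rfl] at h
    cases hs : PySem.Str.split? content "\n" with
    | none => rw [hs] at h; simp at h
    | some L => rw [hs] at h; simp at h ⊢; exact h
  rw [PySem.Str.toList_join, pv_foldA, List.nil_append, pv_key]
  rw [show (((PySem.Str.split? content "\n").getD []).map pvLineB).map String.toList
      = (((PySem.Str.split? content "\n").getD []).map String.toList).map pvLineC from by
    simp only [List.map_map]; exact List.map_congr_left (fun x _ => pv_lineB_toList x)]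
  rw [hsplit, pv_splitOn_eq_pvLines]
  rw [show ("\n" : String).toList = ['\n'] from rfl]
  rw [show (String.ofList (PySem.Chars.join [] (pvAltGo content.toList []))).toList
      = PySem.Chars.join [] (pvAltGo content.toList []) from String.toList_ofList]
  rw [pv_join_nil_flatten]
  exact (pv_main content.toList.length content.toList le_rfl).symm
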